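-- pv_equiv track=rewrite | github.com/DemonDamon/AgenticX | agenticx/tools/skill_bundle.py | _normalize_disabled_skills_from_config
-- ===== SOURCE A (Python) =====
-- from typing import Any, Dict, List, Optional, Set, TYPE_CHECKING
--
-- def _normalize_disabled_skills_from_config(raw: Any) -> List[str]:
--     """Normalize ``skills.disabled`` to a sorted unique list of skill names."""
--     if raw is None:
--         return []
--     if isinstance(raw, str) and raw.strip():
--         return [raw.strip()]
--     if not isinstance(raw, list):
--         return []
--     seen: set[str] = set()
--     out: List[str] = []
--     for x in raw:
--         name = str(x).strip()
--         if not name or name in seen: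
--             continue
--         seen.add(name)
--         out.append(name)
--     return sorted(out)
-- ===== SOURCE B (Python) =====
-- def _normalize_disabled_skills_from_config(raw):
--     """Normalize ``skills.disabled`` to a sorted unique list of skill names."""
--     if raw is None:
--         return []
--     if isinstance(raw, str) and raw.strip():
--         return [raw.strip()]
--     if not isinstance(raw, list):
--         return []
--     names = sorted(n for x in raw if (n := str(x).strip()))
--     out = []
--     for n in names:
--         if not out or out[-1] != n:
--             out.append(n)
--     return out
-- ===== Notes on version B (the rewrite author's own statement) =====
-- stated objective: alternative
-- what changed: B drops the seen-set entirely: it sorts the stripped non-empty names first and removes duplicates in one linear pass by comparing each name with the previously kept one, instead of A's set-membership dedup followed by a sort.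
import Mathlib
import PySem

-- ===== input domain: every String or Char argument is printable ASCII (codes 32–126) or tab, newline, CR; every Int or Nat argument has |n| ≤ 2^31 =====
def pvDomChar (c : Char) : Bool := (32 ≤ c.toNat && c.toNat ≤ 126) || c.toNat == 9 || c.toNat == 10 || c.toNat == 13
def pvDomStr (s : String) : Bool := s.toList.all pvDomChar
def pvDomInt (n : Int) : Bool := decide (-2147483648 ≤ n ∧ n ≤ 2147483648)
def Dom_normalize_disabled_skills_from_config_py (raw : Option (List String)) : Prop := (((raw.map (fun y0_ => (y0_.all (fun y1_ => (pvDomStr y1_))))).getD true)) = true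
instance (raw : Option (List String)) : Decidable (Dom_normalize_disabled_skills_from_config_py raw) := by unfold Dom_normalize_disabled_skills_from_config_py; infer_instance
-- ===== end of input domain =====

-- B replaces A's seen-set dedup followed by a final sort with sort-first then one adjacent-compare pass (alternative decomposition, same asymptotic cost).
-- Under the type convention raw is None or a list of str, so A's str-input and non-list guard branches are unreachable and not ported.

-- ===== PORT A =====
-- loop body of A: name = str(x).strip(); skip if empty or seen; else add to seen and append
def pvStepA (st : PySem.Set String × List String) (x : String) : PySem.Set String × List String :=
  let name := PySem.Str.strip x
  if name = "" ∨ PySem.Set.contains st.1 name then st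
  else (PySem.Set.add st.1 name, st.2 ++ [name])

def normalize_disabled_skills_from_config_py (raw : Option (List String)) : List String :=
  match raw with
  | none => []
  | some lst =>
    PySem.List.sorted (lst.foldl pvStepA (PySem.Set.empty, [])).2 (fun s => s) false

-- ===== PORT B =====
-- loop body of B: append n unless it equals the last appended name
def pvStepB (out : List String) (n : String) : List String :=
  if out = [] ∨ out.getLast? ≠ some n then out ++ [n] else out

def normalize_disabled_skills_from_config_py_alt (raw : Option (List String)) : List String :=
  match raw with
  | none => []
  | some lst =>
    let names := PySem.List.sorted ((lst.map PySem.Str.strip).filter (fun n => n ≠ "")) (fun s => s) false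
    names.foldl pvStepB []

-- ===== PRECONDITION & SPEC =====
def Spec_normalize_disabled_skills_from_config_py (raw : Option (List String)) (out : List String) : Prop := out = normalize_disabled_skills_from_config_py_alt raw
instance (raw : Option (List String)) (out : List String) : Decidable (Spec_normalize_disabled_skills_from_config_py raw out) := by unfold Spec_normalize_disabled_skills_from_config_py; infer_instance

-- ===== CLAIM (what is proved, stated in full; the proofs are below) =====
def Claim_equal_normalize_disabled_skills_from_config_py : Prop := ∀ (raw : Option (List String)), Dom_normalize_disabled_skills_from_config_py raw → Spec_normalize_disabled_skills_from_config_py raw (normalize_disabled_skills_from_config_py raw)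

-- ===== LEMMAS AND PROOFS =====

-- in a strictly increasing list, the last element is an upper bound
theorem pv_last_ub (acc : List String) (hp : acc.Pairwise (· < ·)) (m : String)
    (hm : acc.getLast? = some m) : ∀ a ∈ acc, a ≤ m := by
  obtain ⟨ys, rfl⟩ := List.getLast?_eq_some_iff.mp hm
  intro a ha
  rcases List.mem_append.mp ha with h | h
  · exact le_of_lt ((List.pairwise_append.mp hp).2.2 a h m (by simp))
  · simp at h; subst h; rfl

-- B's adjacent-dedup pass on a sorted tail: result is strictly increasing with members acc ∪ names
theorem pv_foldB_spec : ∀ (names acc : List String), names.Pairwise (· ≤ ·) →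
    acc.Pairwise (· < ·) → (∀ a ∈ acc, ∀ b ∈ names, a ≤ b) →
    (names.foldl pvStepB acc).Pairwise (· < ·) ∧
    (∀ x, x ∈ names.foldl pvStepB acc ↔ x ∈ acc ∨ x ∈ names) := by
  intro names
  induction names with
  | nil => intro acc _ hacc _; simpa using hacc
  | cons n t ih =>
    intro acc hs hacc hle
    rcases List.pairwise_cons.mp hs with ⟨hn, hst⟩
    by_cases hc : acc = [] ∨ acc.getLast? ≠ some n
    · have hstep : pvStepB acc n = acc ++ [n] := by
        unfold pvStepB
        split
        · rfl
        · rename_i h; exact absurd hc h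
      rw [List.foldl_cons, hstep]
      have hlt : ∀ a ∈ acc, a < n := by
        intro a ha
        cases hgl : acc.getLast? with
        | none => rw [List.getLast?_eq_none_iff] at hgl; subst hgl; simp at ha
        | some m =>
          have hmn : m ≠ n := by
            rcases hc with hc | hc
            · subst hc; simp at hgl
            · exact fun h => hc (h ▸ hgl)
          have h1 : a ≤ m := pv_last_ub acc hacc m hgl a ha
          have h2 : m ≤ n := hle m (List.mem_of_getLast? hgl) n List.mem_cons_self
          exact lt_of_le_of_lt h1 (lt_of_le_of_ne h2 hmn)
      have hacc' : (acc ++ [n]).Pairwise (· < ·) := by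
        rw [List.pairwise_append]
        exact ⟨hacc, List.pairwise_singleton _ _, by simpa using hlt⟩
      have hle' : ∀ a ∈ acc ++ [n], ∀ b ∈ t, a ≤ b := by
        intro a ha b hb
        rcases List.mem_append.mp ha with ha | ha
        · exact hle a ha b (List.mem_cons_of_mem _ hb)
        · simp at ha; subst ha; exact hn b hb
      obtain ⟨h1, h2⟩ := ih (acc ++ [n]) hst hacc' hle'
      refine ⟨h1, fun x => ?_⟩
      rw [h2 x]
      simp [or_assoc]
    · rcases not_or.mp hc with ⟨hne, hlast⟩
      have hlast' : acc.getLast? = some n := not_not.mp hlast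
      have hstep : pvStepB acc n = acc := by
        unfold pvStepB
        split
        · rename_i h; exact absurd h hc
        · rfl
      rw [List.foldl_cons, hstep]
      have hnacc : n ∈ acc := List.mem_of_getLast? hlast'
      have hle' : ∀ a ∈ acc, ∀ b ∈ t, a ≤ b :=
        fun a ha b hb => hle a ha b (List.mem_cons_of_mem _ hb)
      obtain ⟨h1, h2⟩ := ih acc hst hacc hle'
      refine ⟨h1, fun x => ?_⟩
      rw [h2 x]
      constructor
      · rintro (h | h)
        · exact Or.inl h
        · exact Or.inr (List.mem_cons_of_mem _ h)
      · rintro (h | h)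
        · exact Or.inl h
        · rcases List.mem_cons.mp h with h | h
          · exact Or.inl (h ▸ hnacc)
          · exact Or.inr h

-- A's seen-set pass: out stays duplicate-free and collects the non-empty stripped names
theorem pv_foldA_spec : ∀ (lst : List String) (s : PySem.Set String) (out : List String),
    (∀ x, x ∈ s ↔ x ∈ out) → out.Nodup →
    (lst.foldl pvStepA (s, out)).2.Nodup ∧
    (∀ x, x ∈ (lst.foldl pvStepA (s, out)).2 ↔
      x ∈ out ∨ (x ≠ "" ∧ ∃ y ∈ lst, PySem.Str.strip y = x)) := by
  intro lst
  induction lst with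
  | nil => intro s out _ hnd; simpa using hnd
  | cons y ys ih =>
    intro s out hmem hnd
    by_cases hc : PySem.Str.strip y = "" ∨ PySem.Set.contains s (PySem.Str.strip y)
    · have hstep : pvStepA (s, out) y = (s, out) := by
        dsimp only [pvStepA]
        rw [if_pos hc]
      rw [List.foldl_cons, hstep]
      obtain ⟨h1, h2⟩ := ih s out hmem hnd
      refine ⟨h1, fun x => ?_⟩
      rw [h2 x]
      constructor
      · rintro (h | h)
        · exact Or.inl h
        · exact Or.inr ⟨h.1, by rcases h.2 with ⟨z, hz, he⟩; exact ⟨z, List.mem_cons_of_mem _ hz, he⟩⟩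
      · rintro (h | ⟨hne, z, hz, he⟩)
        · exact Or.inl h
        · rcases List.mem_cons.mp hz with hz | hz
          · subst hz
            rcases hc with hc | hc
            · exact absurd (he ▸ hc) hne
            · exact Or.inl ((hmem x).mp (he ▸ (PySem.Set.contains_iff _ _).mp hc))
          · exact Or.inr ⟨hne, z, hz, he⟩
    · rcases not_or.mp hc with ⟨hne0, hnc⟩
      have hstep : pvStepA (s, out) y = (PySem.Set.add s (PySem.Str.strip y), out ++ [PySem.Str.strip y]) := by
        dsimp only [pvStepA]
        rw [if_neg hc]
      rw [List.foldl_cons, hstep]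
      have hnotin : PySem.Str.strip y ∉ out := by
        intro h
        exact hnc ((PySem.Set.contains_iff _ _).mpr ((hmem _).mpr h))
      have hmem' : ∀ x, x ∈ PySem.Set.add s (PySem.Str.strip y) ↔ x ∈ out ++ [PySem.Str.strip y] := by
        intro x
        rw [PySem.Set.mem_add, List.mem_append, hmem x]
        simp
      have hnd' : (out ++ [PySem.Str.strip y]).Nodup :=
        List.Nodup.append hnd (List.nodup_singleton _) (List.disjoint_singleton.mpr hnotin)
      obtain ⟨h1, h2⟩ := ih _ _ hmem' hnd'
      refine ⟨h1, fun x => ?_⟩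
      rw [h2 x]
      constructor
      · rintro (h | h)
        · rcases List.mem_append.mp h with h | h
          · exact Or.inl h
          · simp at h; subst h
            exact Or.inr ⟨hne0, y, List.mem_cons_self, rfl⟩
        · exact Or.inr ⟨h.1, by rcases h.2 with ⟨z, hz, he⟩; exact ⟨z, List.mem_cons_of_mem _ hz, he⟩⟩
      · rintro (h | ⟨hne, z, hz, he⟩)
        · exact Or.inl (List.mem_append_left _ h)
        · rcases List.mem_cons.mp hz with hz | hz
          · subst hz; exact Or.inl (List.mem_append_right _ (by simp [he]))
          · exact Or.inr ⟨hne, z, hz, he⟩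

-- ===== VERDICT (by name: the statement is the Claim_ definition above) =====
theorem normalize_disabled_skills_from_config_py_spec : Claim_equal_normalize_disabled_skills_from_config_py := by
  intro raw _
  unfold Spec_normalize_disabled_skills_from_config_py
  cases raw with
  | none => rfl
  | some lst =>
    unfold normalize_disabled_skills_from_config_py normalize_disabled_skills_from_config_py_alt
    simp only
    set l := (lst.map PySem.Str.strip).filter (fun n => n ≠ "") with hl
    obtain ⟨hAnd, hAmem⟩ := pv_foldA_spec lst PySem.Set.empty [] (by simp [PySem.Set.empty]) List.nodup_nil
    have hsp : (PySem.List.sorted l (fun s => s) false).Pairwise (· ≤ ·) :=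
      PySem.List.sorted_pairwise l (fun s => s)
    obtain ⟨hBlt, hBmem⟩ := pv_foldB_spec (PySem.List.sorted l (fun s => s) false) []
      hsp List.Pairwise.nil (by simp)
    apply PySem.List.sorted_eq_of_perm_of_pairwise_lt
    · -- the B result is a permutation of A's out list
      rw [List.perm_ext_iff_of_nodup (hBlt.imp ne_of_lt) hAnd]
      intro x
      rw [hBmem x, hAmem x, PySem.List.mem_sorted]
      simp only [List.not_mem_nil, false_or, hl, List.mem_filter, List.mem_map, decide_eq_true_eq]
      constructor
      · rintro ⟨⟨z, hz, rfl⟩, hne⟩; exact ⟨hne, z, hz, rfl⟩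
      · rintro ⟨hne, z, hz, rfl⟩; exact ⟨⟨z, hz, rfl⟩, hne⟩
    · exact hBlt
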